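-- pv_equiv track=rewrite | github.com/daniel-reich/turbo-robot | dqJYvDRTyXzQPGimc_10.py | is_unfair_hurdle
-- ===== SOURCE A (Python) =====
-- def is_unfair_hurdle(hurdles):
--
--   Height = len(hurdles)
--
--   if (Height >= 4):
--     return True
--
--   Positions = []
--   Span = hurdles[0]
--
--   Counter = 0
--   Length = len(Span)
--
--   while (Counter < Length):
--
--     Item = Span[Counter]
--
--     if (Item == "#"):
--       Positions.append(Counter)
--       Counter += 1
--     else:
--       Counter += 1
--
--   Previous = 0
--   Current = 1
--   Length = len(Positions)
--
--   while (Current < Length):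
--     Item_A = int(Positions[Previous])
--     Item_B = int(Positions[Current])
--     Distance = Item_B - Item_A
--
--     if (Distance < 4):
--       return True
--     else:
--       Previous += 1
--       Current += 1
--
--   return False
-- ===== SOURCE B (Python) =====
-- def is_unfair_hurdle(hurdles):
--     if len(hurdles) >= 4:
--         return True
--     row = hurdles[0]
--     last = None
--     for i, c in enumerate(row):
--         if c == '#':
--             if last is not None and i - last < 4:
--                 return True
--             last = i
--     return False
-- ===== Notes on version B (the rewrite author's own statement) =====
-- stated objective: simpler
-- what changed: Instead of building a full list of '#' positions and then a second scan comparing adjacent pairs, B does a single pass over the first row keeping only the last '#' index and returns as soon as a gap under 4 appears.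
import Mathlib
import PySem

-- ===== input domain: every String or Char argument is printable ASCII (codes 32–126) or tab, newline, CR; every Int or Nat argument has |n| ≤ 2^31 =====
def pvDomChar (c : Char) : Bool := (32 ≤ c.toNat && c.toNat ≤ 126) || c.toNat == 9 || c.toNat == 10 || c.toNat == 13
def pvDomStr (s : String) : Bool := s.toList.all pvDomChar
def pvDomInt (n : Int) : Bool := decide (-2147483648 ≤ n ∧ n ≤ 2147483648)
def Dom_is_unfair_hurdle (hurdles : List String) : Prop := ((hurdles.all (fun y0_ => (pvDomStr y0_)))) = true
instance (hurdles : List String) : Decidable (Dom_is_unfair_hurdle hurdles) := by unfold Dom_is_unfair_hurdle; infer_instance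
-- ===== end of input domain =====

-- B replaces A's two passes (build the list of '#' positions, then scan adjacent pairs)
-- by a single pass that keeps only the last '#' index; same return value on Pre_.

-- ===== PORT A =====
-- first while loop of A: collect indices of '#' characters
def pvA_collect (span : List Char) (counter : Int) : List Int :=
  match span with
  | [] => []
  | c :: rest =>
    if c = '#' then counter :: pvA_collect rest (counter + 1)
    else pvA_collect rest (counter + 1)

-- second while loop of A: compare Positions[Previous] with Positions[Current]
def pvA_scan (positions : List Int) : Bool :=
  match positions with
  | a :: b :: rest => if b - a < 4 then true else pvA_scan (b :: rest)
  | _ => false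

def is_unfair_hurdle (hurdles : List String) : Bool :=
  if hurdles.length ≥ 4 then true
  else
    match PySem.List.pyGet? hurdles 0 with
    | none => false  -- IndexError in Python; excluded by Pre_
    | some span => pvA_scan (pvA_collect span.toList 0)

-- ===== PORT B =====
-- B's single for-loop over enumerate(row), carrying the last '#' index
def pvB_loop (chars : List Char) (i : Int) (last : Option Int) : Bool :=
  match chars with
  | [] => false
  | c :: rest =>
    if c = '#' then
      match last with
      | some l => if i - l < 4 then true else pvB_loop rest (i + 1) (some i)
      | none => pvB_loop rest (i + 1) (some i)
    else pvB_loop rest (i + 1) last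

def is_unfair_hurdle_alt (hurdles : List String) : Bool :=
  if hurdles.length ≥ 4 then true
  else
    match PySem.List.pyGet? hurdles 0 with
    | none => false  -- IndexError in Python; excluded by Pre_
    | some row => pvB_loop row.toList 0 none

-- ===== PRECONDITION & SPEC =====
-- Pre_ excludes only the empty list, on which both Pythons raise IndexError (hurdles[0]).
def Pre_is_unfair_hurdle (hurdles : List String) : Prop := hurdles ≠ []
instance (hurdles : List String) : Decidable (Pre_is_unfair_hurdle hurdles) := by
  unfold Pre_is_unfair_hurdle; infer_instance

def pvWitness_is_unfair_hurdle : List String := ["#..#"]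

def Spec_is_unfair_hurdle (hurdles : List String) (out : Bool) : Prop := out = is_unfair_hurdle_alt hurdles
instance (hurdles : List String) (out : Bool) : Decidable (Spec_is_unfair_hurdle hurdles out) := by unfold Spec_is_unfair_hurdle; infer_instance

-- ===== CLAIM (what is proved, stated in full; the proofs are below) =====
def Claim_equal_is_unfair_hurdle : Prop := ∀ (hurdles : List String), Dom_is_unfair_hurdle hurdles → Pre_is_unfair_hurdle hurdles → Spec_is_unfair_hurdle hurdles (is_unfair_hurdle hurdles)

-- ===== LEMMAS AND PROOFS =====

-- B's single pass computes A's scan of A's collected positions (with the carried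
-- `last` index prepended when present).
theorem pvB_eq_scan_collect (span : List Char) :
    ∀ (i : Int) (last : Option Int),
      pvB_loop span i last =
        match last with
        | none => pvA_scan (pvA_collect span i)
        | some l => pvA_scan (l :: pvA_collect span i) := by
  induction span with
  | nil =>
    intro i last
    cases last with
    | none => simp [pvB_loop, pvA_collect, pvA_scan]
    | some l => simp [pvB_loop, pvA_collect, pvA_scan]
  | cons c rest ih =>
    intro i last
    cases last with
    | none =>
      by_cases hc : c = '#' <;> simp [pvB_loop, pvA_collect, hc, ih]
    | some l =>
      by_cases hc : c = '#'
      · by_cases h4 : i - l < 4 <;>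
          simp [pvB_loop, pvA_collect, pvA_scan, hc, h4, ih]
      · simp [pvB_loop, pvA_collect, hc, ih]

-- ===== VERDICT (by name: the statement is the Claim_ definition above) =====
theorem is_unfair_hurdle_spec : Claim_equal_is_unfair_hurdle := by
  intro hurdles _ hpre
  unfold Spec_is_unfair_hurdle is_unfair_hurdle is_unfair_hurdle_alt
  by_cases hlen : hurdles.length ≥ 4
  · simp [hlen]
  · cases h : PySem.List.pyGet? hurdles 0 with
    | none => simp [hlen, h]
    | some span =>
      simp only [hlen, if_false, h]
      rw [pvB_eq_scan_collect]
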